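-- pv_equiv track=rewrite | github.com/LionPony/PythonBasic | kr.co.programmers.school/Lv0/Function(Method)/BindString.py | solution
-- ===== SOURCE A (Python) =====
-- def solution(strArr):
--     map = dict()
--     for i in strArr:
--         if len(i) not in map:
--             map[len(i)] = 1
--         else :
--             map[len(i)] = map[len(i)] + 1
--     return max(map.values())
-- ===== SOURCE B (Python) =====
-- def solution(strArr):
--     lens = sorted(len(s) for s in strArr)
--     best = 0
--     cur = 0
--     prev = None
--     for v in lens:
--         cur = cur + 1 if v == prev else 1
--         prev = v
--         if cur > best:
--             best = cur
--     return best
-- ===== Notes on version B (the rewrite author's own statement) =====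
-- stated objective: alternative
-- what changed: Sorts the lengths and scans adjacent runs in one pass with a running best, instead of building a length-to-count dictionary and taking the max of its values.
import Mathlib
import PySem

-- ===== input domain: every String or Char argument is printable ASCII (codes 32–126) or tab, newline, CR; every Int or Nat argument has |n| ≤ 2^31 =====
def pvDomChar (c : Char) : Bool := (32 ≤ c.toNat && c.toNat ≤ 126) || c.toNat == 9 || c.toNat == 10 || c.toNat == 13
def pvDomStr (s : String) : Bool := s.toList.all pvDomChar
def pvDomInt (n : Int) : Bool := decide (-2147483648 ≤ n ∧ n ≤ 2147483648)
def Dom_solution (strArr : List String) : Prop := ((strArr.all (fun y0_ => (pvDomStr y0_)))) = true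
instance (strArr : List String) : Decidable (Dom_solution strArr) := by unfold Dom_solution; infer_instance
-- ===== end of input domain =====

-- B replaces A's length→count dictionary by sort-then-run-scan; return values only, equal on nonempty input.

-- ===== PORT A =====
-- A builds a dict from length to count, then takes max of the values.
-- Python's max([]) raises ValueError: Pre_solution excludes the empty list; .getD 0 is never the result there.
def solution (strArr : List String) : Int :=
  let m : PySem.Dict Int Int := strArr.foldl
    (fun m i =>
      if (m.get? (PySem.Str.len i)).isNone then m.insert (PySem.Str.len i) 1
      else m.insert (PySem.Str.len i) (m.getD (PySem.Str.len i) 0 + 1))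
    PySem.Dict.empty
  (PySem.List.max? m.values (fun x => x)).getD 0

-- ===== PORT B =====
-- B sorts the lengths, then one pass tracking the current run length and the best run so far.
def solution_alt (strArr : List String) : Int :=
  let lens : List Int := PySem.List.sorted (strArr.map (fun s => PySem.Str.len s)) (fun x => x) false
  let st : Int × Int × Option Int := lens.foldl
    (fun st v =>
      let cur := if some v = st.2.2 then st.2.1 + 1 else 1
      let prev := some v
      let best := if cur > st.1 then cur else st.1
      (best, cur, prev))
    (0, 0, none)
  st.1

-- ===== PRECONDITION & SPEC =====
-- Pre_: Python's max() raises ValueError on an empty sequence, which A hits exactly when strArr = [].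
def Pre_solution (strArr : List String) : Prop := strArr ≠ []
instance (strArr : List String) : Decidable (Pre_solution strArr) := by unfold Pre_solution; infer_instance
def pvWitness_solution : List String := ["a", "bc", "d"]


def Spec_solution (strArr : List String) (out : Int) : Prop := out = solution_alt strArr
instance (strArr : List String) (out : Int) : Decidable (Spec_solution strArr out) := by unfold Spec_solution; infer_instance

-- ===== CLAIM (what is proved, stated in full; the proofs are below) =====
def Claim_equal_solution : Prop := ∀ (strArr : List String), Dom_solution strArr → Pre_solution strArr → Spec_solution strArr (solution strArr)

-- ===== LEMMAS AND PROOFS =====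

-- B's loop body, named for the lemmas (definitionally the lambda in solution_alt).
def pvStepB (st : Int × Int × Option Int) (v : Int) : Int × Int × Option Int :=
  let cur := if some v = st.2.2 then st.2.1 + 1 else 1
  let prev := some v
  let best := if cur > st.1 then cur else st.1
  (best, cur, prev)

-- A's two branches both store getD+1 (getD is 0 when the key is absent).
theorem pvStep (m : PySem.Dict Int Int) (k : Int) :
    (if (m.get? k).isNone then m.insert k 1 else m.insert k (m.getD k 0 + 1))
      = m.insert k (m.getD k 0 + 1) := by
  cases h : m.get? k <;> simp [PySem.Dict.getD_eq_get?_getD, h]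

-- A's result is max over the distinct lengths of their counts.
theorem pvA (strArr : List String) :
    solution strArr =
      (PySem.List.max?
        ((PySem.Set.ofList (strArr.map (fun s => PySem.Str.len s))).map
          (fun v => ((strArr.map (fun s => PySem.Str.len s)).count v : Int)))
        (fun x => x)).getD 0 := by
  unfold solution
  have h1 : strArr.foldl
      (fun (m : PySem.Dict Int Int) i =>
        if (m.get? (PySem.Str.len i)).isNone then m.insert (PySem.Str.len i) 1
        else m.insert (PySem.Str.len i) (m.getD (PySem.Str.len i) 0 + 1))
      PySem.Dict.empty
      = PySem.Dict.counter (strArr.map (fun s => PySem.Str.len s)) := by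
    simp only [pvStep]
    rw [← List.foldl_map (f := fun s => PySem.Str.len s)
        (g := fun (m : PySem.Dict Int Int) k => m.insert k (m.getD k 0 + 1))]
    exact PySem.Dict.foldl_insert_getD_add_one_eq_counter _
  simp only [h1, PySem.Dict.values, PySem.Dict.items_counter, List.map_map]
  rfl

theorem pvIfMax (b c : Int) : (if c > b then c else b) = max b c := by
  rw [max_def]; split_ifs <;> omega

-- Running a run of equal values with matching prev: cur grows, best collapses to one max.
theorem pvRun (v : Int) (k : Nat) : ∀ (b c : Int), c ≤ b →
    (List.replicate k v).foldl pvStepB (b, c, some v) = (max b (c + k), c + k, some v) := by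
  induction k with
  | zero => intro b c h; simp [max_eq_left h]
  | succ j ih =>
    intro b c h
    rw [List.replicate_succ, List.foldl_cons]
    have hs : pvStepB (b, c, some v) v = (max b (c + 1), c + 1, some v) := by
      simp [pvStepB]
      split_ifs <;> omega
    rw [hs, ih _ _ (le_max_right _ _)]
    simp only [Prod.mk.injEq]
    refine ⟨by push_cast; omega, by push_cast; omega, trivial⟩

-- A fresh run (prev is none or strictly below v).
theorem pvRunFresh (v : Int) (k : Nat) (b c : Int) (p : Option Int) (hk : 1 ≤ k)
    (hp : p = none ∨ ∃ w, p = some w ∧ w < v) :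
    (List.replicate k v).foldl pvStepB (b, c, p) = (max b k, (k : Int), some v) := by
  obtain ⟨j, rfl⟩ : ∃ j, k = j + 1 := ⟨k - 1, by omega⟩
  rw [List.replicate_succ, List.foldl_cons]
  have hne : some v ≠ p := by
    rcases hp with rfl | ⟨w, rfl, hw⟩
    · simp
    · simp; omega
  have hs : pvStepB (b, c, p) v = (max b 1, 1, some v) := by
    simp only [pvStepB, if_neg hne, pvIfMax]
  rw [hs, pvRun v j _ _ (le_max_right _ _)]
  simp only [Prod.mk.injEq]
  refine ⟨by push_cast; omega, by push_cast; omega, trivial⟩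

-- Peel the run of the minimum off a sorted list.
theorem pvPeel : ∀ (S : List Int), S.Pairwise (· ≤ ·) → ∀ v : Int, (∀ x ∈ S, v ≤ x) →
    ∃ S', S = List.replicate (S.count v) v ++ S' ∧ (∀ x ∈ S', v < x) ∧ S'.Pairwise (· ≤ ·) := by
  intro S
  induction S with
  | nil => intro _ v _; exact ⟨[], by simp⟩
  | cons a t ih =>
    intro hp v hv
    rw [List.pairwise_cons] at hp
    by_cases hav : a = v
    · subst hav
      obtain ⟨S', h1, h2, h3⟩ := ih hp.2 a hp.1
      refine ⟨S', ?_, h2, h3⟩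
      rw [List.count_cons_self, List.replicate_succ, List.cons_append]
      exact congrArg (a :: ·) h1
    · have hva : v < a := lt_of_le_of_ne (hv a (by simp)) (Ne.symm hav)
      refine ⟨a :: t, ?_, ?_, List.pairwise_cons.mpr hp⟩
      · have : (a :: t).count v = 0 := by
          rw [List.count_eq_zero]
          intro hmem
          rcases List.mem_cons.mp hmem with h | h
          · exact hav h.symm
          · exact absurd (hp.1 v h) (by omega)
        simp [this]
      · intro x hx
        rcases List.mem_cons.mp hx with rfl | h
        · exact hva
        · exact lt_of_lt_of_le hva (hp.1 x h)

-- Main invariant of B's scan over a sorted list.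
theorem pvMainB : ∀ (n : Nat) (S : List Int), S.length ≤ n → S.Pairwise (· ≤ ·) →
    ∀ (b c : Int) (p : Option Int), 0 ≤ c → c ≤ b →
    (p = none ∨ ∃ w, p = some w ∧ ∀ x ∈ S, w < x) →
    (let r := (S.foldl pvStepB (b, c, p)).1
     (r = b ∨ ∃ u ∈ S, r = (S.count u : Int)) ∧ b ≤ r ∧ ∀ u ∈ S, (S.count u : Int) ≤ r) := by
  intro n
  induction n with
  | zero =>
    intro S hS _ b c p _ _ _
    have : S = [] := List.length_eq_zero_iff.mp (by omega)
    subst this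
    simp
  | succ n ih =>
    intro S hS hsort b c p hc hcb hp
    cases S with
    | nil => simp
    | cons a t =>
      have hmin : ∀ x ∈ a :: t, a ≤ x := by
        intro x hx
        rcases List.mem_cons.mp hx with rfl | h
        · exact le_refl _
        · exact (List.pairwise_cons.mp hsort).1 x h
      obtain ⟨S', hdec, hgt, hsort'⟩ := pvPeel (a :: t) hsort a hmin
      set k := (a :: t).count a with hk
      have hk1 : 1 ≤ k := List.count_pos_iff.mpr (by simp)
      have hlen : S'.length ≤ n := by
        have hlc : (a :: t).length = k + S'.length := by
          rw [hdec]; simp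
        simp only [List.length_cons] at hS hlc
        omega
      have hfold : ((a :: t).foldl pvStepB (b, c, p)).1
          = (S'.foldl pvStepB (max b k, (k : Int), some a)).1 := by
        rw [hdec, List.foldl_append,
          pvRunFresh a k b c p hk1 (by
            rcases hp with h | ⟨w, rfl, hw⟩
            · exact Or.inl h
            · exact Or.inr ⟨w, rfl, hw a (by rw [hdec]; exact List.mem_append_left _ (by simp [List.mem_replicate]; omega))⟩)]
      have hIH := ih S' hlen hsort' (max b k) k (some a) (by positivity)
        (le_max_right _ _) (Or.inr ⟨a, rfl, hgt⟩)
      simp only at hIH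
      obtain ⟨hcase, hle, hall⟩ := hIH
      -- counts in a :: t in terms of k and S'
      have hcount : ∀ u : Int, ((a :: t).count u : Int)
          = if u = a then (k : Int) else (S'.count u : Int) := by
        intro u
        rw [hdec, List.count_append, List.count_replicate]
        by_cases hu : u = a
        · subst hu
          have : S'.count u = 0 := List.count_eq_zero.mpr (fun h => absurd (hgt u h) (by omega))
          simp [this]
        · rw [if_neg hu]
          have hz : (if (a == u) = true then k else 0) = 0 := by
            rw [if_neg]
            simp only [beq_iff_eq]
            exact fun hh => hu hh.symm
          rw [hz]
          simp
      rw [hfold]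
      refine ⟨?_, le_trans (le_max_left _ _) hle, ?_⟩
      · rcases hcase with h | ⟨u, hu, hcu⟩
        · by_cases hbk : (k : Int) ≤ b
          · left; rw [h, max_eq_left hbk]
          · right
            exact ⟨a, by simp, by rw [h, hcount a, if_pos rfl, max_eq_right (by omega)]⟩
        · right
          have hua : u ≠ a := by
            have := hgt u hu; omega
          refine ⟨u, ?_, by rw [hcu, hcount u, if_neg hua]⟩
          rw [hdec]; exact List.mem_append_right _ hu
      · intro u hu
        rw [hcount u]
        by_cases hua : u = a
        · rw [if_pos hua]
          exact le_trans (le_max_right b (k : Int)) hle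
        · rw [if_neg hua]
          have hu' : u ∈ S' := by
            rw [hdec] at hu
            rcases List.mem_append.mp hu with h | h
            · exact absurd (List.mem_replicate.mp h).2 hua
            · exact h
          exact hall u hu'

-- B's result characterised: it is a realised count and bounds every count (nonempty input).
theorem pvB (strArr : List String) (h : strArr ≠ []) :
    (∃ u ∈ strArr.map (fun s => PySem.Str.len s),
        solution_alt strArr = ((strArr.map (fun s => PySem.Str.len s)).count u : Int)) ∧
    (∀ u ∈ strArr.map (fun s => PySem.Str.len s),
        ((strArr.map (fun s => PySem.Str.len s)).count u : Int) ≤ solution_alt strArr) := by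
  set lens := strArr.map (fun s => PySem.Str.len s) with hlens
  set S := PySem.List.sorted lens (fun x => x) false with hS
  have hperm : S.Perm lens := PySem.List.sorted_perm lens _ _
  have hsort : S.Pairwise (· ≤ ·) := PySem.List.sorted_pairwise lens (fun x => x)
  have hBdef : solution_alt strArr = (S.foldl pvStepB (0, 0, none)).1 := rfl
  have hmain := pvMainB S.length S (le_refl _) hsort 0 0 none (le_refl _) (le_refl _) (Or.inl rfl)
  simp only at hmain
  obtain ⟨hcase, _, hall⟩ := hmain
  have hSne : S ≠ [] := by
    intro hnil
    have hl : lens = [] := (PySem.List.sorted_eq_nil_iff lens _ _).mp hnil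
    rw [hlens] at hl
    exact h (List.map_eq_nil_iff.mp hl)
  have hcount : ∀ u : Int, S.count u = lens.count u := fun u => hperm.count_eq u
  have hmem : ∀ u : Int, u ∈ S ↔ u ∈ lens := fun u => hperm.mem_iff
  constructor
  · rcases hcase with h0 | ⟨u, hu, hcu⟩
    · exfalso
      obtain ⟨x, hx⟩ := List.exists_mem_of_ne_nil S hSne
      have h1 := hall x hx
      have h2 : 1 ≤ S.count x := List.count_pos_iff.mpr hx
      rw [h0] at h1
      omega
    · exact ⟨u, (hmem u).mp hu, by rw [hBdef, hcu, hcount u]⟩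
  · intro u hu
    rw [hBdef, ← hcount u]
    exact hall u ((hmem u).mpr hu)

-- ===== VERDICT (by name: the statement is the Claim_ definition above) =====
theorem solution_spec : Claim_equal_solution := by
  intro strArr _ hpre
  unfold Spec_solution
  set lens := strArr.map (fun s => PySem.Str.len s) with hlens
  have hpre' : strArr ≠ [] := hpre
  have hlne : lens ≠ [] := by
    rw [hlens, Ne, List.map_eq_nil_iff]
    exact hpre'
  -- A's side characterisation
  have hA := pvA strArr
  rw [← hlens] at hA
  have hsetne : PySem.Set.ofList lens ≠ [] := by
    obtain ⟨x, hx⟩ := List.exists_mem_of_ne_nil lens hlne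
    intro hnil
    have := (PySem.Set.mem_ofList lens x).mpr hx
    rw [hnil] at this
    exact absurd this (List.not_mem_nil)
  have hmapne : (PySem.Set.ofList lens).map (fun v => (lens.count v : Int)) ≠ [] := by
    simpa using hsetne
  obtain ⟨m, hm⟩ : ∃ m, PySem.List.max? ((PySem.Set.ofList lens).map (fun v => (lens.count v : Int))) (fun x => x) = some m := by
    cases hmx : PySem.List.max? ((PySem.Set.ofList lens).map (fun v => (lens.count v : Int))) (fun x => x) with
    | none => exact absurd ((PySem.List.max?_eq_none_iff _ _).mp hmx) hmapne
    | some m => exact ⟨m, rfl⟩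
  have hAval : solution strArr = m := by rw [hA, hm]; rfl
  have hAmem := PySem.List.max?_mem hm
  have hAmax := PySem.List.max?_isMax hm
  obtain ⟨v, hv, hvm⟩ := List.mem_map.mp hAmem
  have hvlens : v ∈ lens := (PySem.Set.mem_ofList lens v).mp hv
  -- B's side characterisation
  obtain ⟨⟨u, hu, hcu⟩, hallB⟩ := pvB strArr hpre'
  rw [← hlens] at hu hcu hallB
  -- antisymmetry
  have h1 : solution strArr ≤ solution_alt strArr := by
    rw [hAval, ← hvm]
    exact hallB v hvlens
  have h2 : solution_alt strArr ≤ solution strArr := by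
    rw [hcu, hAval]
    have : (lens.count u : Int) ∈ (PySem.Set.ofList lens).map (fun v => (lens.count v : Int)) :=
      List.mem_map.mpr ⟨u, (PySem.Set.mem_ofList lens u).mpr hu, rfl⟩
    exact hAmax _ this
  omega
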